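-- pv_equiv track=rewrite | github.com/jgrou/ProjectEuler | BouncyNumbers.py | Bouncy
-- ===== SOURCE A (Python) =====
-- def Bouncy(n):
--     number = str(n)
--     increasing = True
--     decreasing = True
--     for i in range(len(number)-1):
--         if number[i] > number[i+1]:
--             increasing = False
--         if number[i] < number[i+1]:
--             decreasing = False
--     return not decreasing and not increasing
-- ===== SOURCE B (Python) =====
-- def Bouncy(n):
--     s = str(n)
--     increasing = s == ''.join(sorted(s))
--     decreasing = s == ''.join(sorted(s, reverse=True))
--     return not increasing and not decreasing
-- ===== Notes on version B (the rewrite author's own statement) =====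
-- stated objective: idiomatic
-- what changed: Replaced the adjacent-pair index scan maintaining two flags with a sort-and-compare: B tests whether the digit string equals its ascending/descending sorted forms.
import Mathlib
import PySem

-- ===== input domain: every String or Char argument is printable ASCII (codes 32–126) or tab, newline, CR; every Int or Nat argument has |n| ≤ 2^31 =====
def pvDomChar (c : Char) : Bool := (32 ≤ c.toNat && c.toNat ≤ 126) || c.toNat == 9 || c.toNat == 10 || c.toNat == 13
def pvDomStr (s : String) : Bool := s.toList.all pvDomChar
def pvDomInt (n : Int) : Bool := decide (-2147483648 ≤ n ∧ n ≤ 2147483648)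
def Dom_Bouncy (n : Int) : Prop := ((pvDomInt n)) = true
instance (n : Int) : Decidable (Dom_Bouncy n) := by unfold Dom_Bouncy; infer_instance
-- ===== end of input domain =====

-- B replaces A's adjacent-pair index scan with sort-and-compare (same results, idiomatic; not faster).


-- ===== PORT A =====
-- str(n) is ported as PySem.Int.toChars (the List Char side of PySem.Int.toStr);
-- number[i] is PySem.List.pyGetD (every index the loop visits is in range).
def Bouncy (n : Int) : Bool :=
  let number := PySem.Int.toChars n
  let st := (PySem.List.pyRange 0 ((number.length : Int) - 1) 1).foldl
    (fun (st : Bool × Bool) i =>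
      let st := if PySem.List.pyGetD number i ' ' > PySem.List.pyGetD number (i + 1) ' '
                then (false, st.2) else st
      if PySem.List.pyGetD number i ' ' < PySem.List.pyGetD number (i + 1) ' '
      then (st.1, false) else st)
    (true, true)
  !st.2 && !st.1

-- ===== PORT B =====
def Bouncy_alt (n : Int) : Bool :=
  let s := PySem.Int.toChars n
  let increasing := s == PySem.List.sorted s (fun c => c) false
  let decreasing := s == PySem.List.sorted s (fun c => c) true
  !increasing && !decreasing

-- ===== PRECONDITION & SPEC =====
def Spec_Bouncy (n : Int) (out : Bool) : Prop := out = Bouncy_alt n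
instance (n : Int) (out : Bool) : Decidable (Spec_Bouncy n out) := by unfold Spec_Bouncy; infer_instance

-- ===== CLAIM (what is proved, stated in full; the proofs are below) =====
def Claim_equal_Bouncy : Prop := ∀ (n : Int), Dom_Bouncy n → Spec_Bouncy n (Bouncy n)

-- ===== LEMMAS AND PROOFS =====

-- one step of A's loop on the pair of chars (x, y) (definitionally the port's loop body)
def bouncyStep (x y : Char) (st : Bool × Bool) : Bool × Bool :=
  let st := if x > y then (false, st.2) else st
  if x < y then (st.1, false) else st

lemma bouncyStep_eq (x y : Char) (st : Bool × Bool) :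
    bouncyStep x y st = (st.1 && !decide (x > y), st.2 && !decide (x < y)) := by
  unfold bouncyStep
  rcases st with ⟨a, b⟩
  by_cases h1 : x > y <;> by_cases h2 : x < y <;> simp [h1, h2]

-- A's index loop over range(len-1), as a fold over List.range with Nat indices
lemma fold_range_spec (cs : List Char) (a b : Bool) :
    (List.range (cs.length - 1)).foldl
      (fun st k => bouncyStep (cs.getD k ' ') (cs.getD (k + 1) ' ') st) (a, b)
    = (a && decide (List.Pairwise (· ≤ ·) cs), b && decide (List.Pairwise (· ≥ ·) cs)) := by
  induction cs generalizing a b with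
  | nil => simp
  | cons c cs ih =>
    cases cs with
    | nil => simp
    | cons d cs =>
      have hlen : (c :: d :: cs).length - 1 = (d :: cs).length - 1 + 1 := by simp
      rw [hlen, List.range_succ_eq_map, List.foldl_cons, List.foldl_map]
      have hstep : ∀ (st : Bool × Bool) (k : Nat),
          bouncyStep ((c :: d :: cs).getD (k + 1) ' ') ((c :: d :: cs).getD (k + 1 + 1) ' ') st
          = bouncyStep ((d :: cs).getD k ' ') ((d :: cs).getD (k + 1) ' ') st := by
        intro st k; rfl
      simp only [hstep]
      rw [show ((c :: d :: cs).getD 0 ' ') = c from rfl,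
          show ((c :: d :: cs).getD 1 ' ') = d from rfl, bouncyStep_eq, ih]
      have h1 : decide (List.Pairwise (· ≤ ·) (c :: d :: cs))
          = (!decide (c > d) && decide (List.Pairwise (· ≤ ·) (d :: cs))) := by
        by_cases hcd : c ≤ d
        · simp [hcd, not_lt.mpr hcd]
          intro h' _ a ha
          exact le_trans hcd (h' a ha)
        · simp [hcd, not_le.mp hcd]
      have h2 : decide (List.Pairwise (· ≥ ·) (c :: d :: cs))
          = (!decide (c < d) && decide (List.Pairwise (· ≥ ·) (d :: cs))) := by
        by_cases hdc : d ≤ c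
        · simp [hdc, not_lt.mpr hdc]
          intro h' _ a ha
          exact le_trans (h' a ha) hdc
        · simp [hdc, not_le.mp hdc]
      rw [h1, h2]
      simp [Bool.and_assoc]

lemma eq_sorted_iff_pairwise (cs : List Char) :
    (cs = PySem.List.sorted cs (fun c => c) false) ↔ List.Pairwise (· ≤ ·) cs := by
  constructor
  · intro h
    have := PySem.List.sorted_pairwise cs (fun c => c)
    rw [← h] at this
    exact this
  · intro h
    exact (PySem.List.sorted_eq_self_of_pairwise cs (fun c => c) h).symm

lemma eq_sorted_rev_iff_pairwise (cs : List Char) :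
    (cs = PySem.List.sorted cs (fun c => c) true) ↔ List.Pairwise (· ≥ ·) cs := by
  constructor
  · intro h
    have := PySem.List.sorted_pairwise_rev cs (fun c => c)
    rw [← h] at this
    exact this
  · intro h
    exact (PySem.List.sorted_rev_eq_self_of_pairwise cs (fun c => c) h).symm

-- the port's pyRange fold computes the two flags
lemma bouncy_fold_eq (cs : List Char) :
    (PySem.List.pyRange 0 ((cs.length : Int) - 1) 1).foldl
      (fun (st : Bool × Bool) i =>
        let st := if PySem.List.pyGetD cs i ' ' > PySem.List.pyGetD cs (i + 1) ' '
                  then (false, st.2) else st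
        if PySem.List.pyGetD cs i ' ' < PySem.List.pyGetD cs (i + 1) ' '
        then (st.1, false) else st)
      (true, true)
    = (decide (List.Pairwise (· ≤ ·) cs), decide (List.Pairwise (· ≥ ·) cs)) := by
  rw [PySem.List.pyRange_one, List.foldl_map]
  have hbody : ∀ (st : Bool × Bool) (k : Nat),
      (fun (st : Bool × Bool) (i : Int) =>
        let st := if PySem.List.pyGetD cs i ' ' > PySem.List.pyGetD cs (i + 1) ' '
                  then (false, st.2) else st
        if PySem.List.pyGetD cs i ' ' < PySem.List.pyGetD cs (i + 1) ' '
        then (st.1, false) else st) st ((0 : Int) + (k : Int))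
      = bouncyStep (cs.getD k ' ') (cs.getD (k + 1) ' ') st := by
    intro st k
    simp only [zero_add]
    rw [show ((k : Int) + 1) = ((k + 1 : Nat) : Int) by push_cast; ring]
    simp only [PySem.List.pyGetD_natCast]
    rfl
  simp only [hbody]
  rw [show (((cs.length : Int) - 1 - 0).toNat) = cs.length - 1 by omega]
  rw [fold_range_spec]
  simp

-- ===== VERDICT (by name: the statement is the Claim_ definition above) =====
theorem Bouncy_spec : Claim_equal_Bouncy := by
  intro n _
  unfold Spec_Bouncy Bouncy Bouncy_alt
  simp only [bouncy_fold_eq]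
  rw [show (PySem.Int.toChars n == PySem.List.sorted (PySem.Int.toChars n) (fun c => c) false)
      = decide (List.Pairwise (· ≤ ·) (PySem.Int.toChars n)) by
        rw [Bool.eq_iff_iff]; simp [eq_sorted_iff_pairwise]]
  rw [show (PySem.Int.toChars n == PySem.List.sorted (PySem.Int.toChars n) (fun c => c) true)
      = decide (List.Pairwise (· ≥ ·) (PySem.Int.toChars n)) by
        rw [Bool.eq_iff_iff]; simp [eq_sorted_rev_iff_pairwise]]
  rw [Bool.and_comm]
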